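-- pv_equiv track=rewrite | github.com/WiktoriaSadlo/pp1 | zadanka/temat_04/zad_36.py | f
-- ===== SOURCE A (Python) =====
-- def f(signs):
--     people = 0
--     for x in range(len(signs)):
--         if signs[x]=='+':
--             people+=1
--         else:
--             people-=1
--         if people>=3:
--             return True
--     return False
-- ===== SOURCE B (Python) =====
-- def f(signs):
--     # Success depends only on where the '+' signs are: after the j-th '+'
--     # (0-based rank j, absolute index i) the balance is (j+1) - (i+1-(j+1))
--     # = 2*j - i + 1, and a prefix balance first reaches 3 at a '+' step,
--     # so the balance ever reaches 3 iff some '+' satisfies i <= 2*j - 2.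
--     plus_positions = [i for i, x in enumerate(signs) if x == '+']
--     return any(i <= 2 * j - 2 for j, i in enumerate(plus_positions))
-- ===== Notes on version B (the rewrite author's own statement) =====
-- stated objective: alternative
-- what changed: Instead of a running +/-1 balance with early return, B first collects the indices of the '+' signs and then checks the purely arithmetic condition i <= 2*j - 2 on the j-th '+' at index i, which characterises a prefix balance reaching 3.
import Mathlib
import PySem

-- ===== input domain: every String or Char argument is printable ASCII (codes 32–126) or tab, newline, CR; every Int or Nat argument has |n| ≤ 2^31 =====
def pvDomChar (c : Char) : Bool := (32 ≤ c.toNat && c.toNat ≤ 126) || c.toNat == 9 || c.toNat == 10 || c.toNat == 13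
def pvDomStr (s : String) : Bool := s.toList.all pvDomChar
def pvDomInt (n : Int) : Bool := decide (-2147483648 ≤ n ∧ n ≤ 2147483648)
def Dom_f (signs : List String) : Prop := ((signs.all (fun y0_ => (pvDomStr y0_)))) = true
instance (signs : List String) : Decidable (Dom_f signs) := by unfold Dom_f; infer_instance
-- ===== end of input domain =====

-- B replaces A's running +/-1 balance loop by collecting '+' positions and testing i <= 2*j-2 (alternative algorithm, same cost).


-- ===== PORT A =====
def fLoop (rest : List String) (people : Int) : Bool :=
  match rest with
  | [] => false
  | s :: rest' =>
    let people' := if s == "+" then people + 1 else people - 1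
    if people' ≥ 3 then true else fLoop rest' people'

def f (signs : List String) : Bool := fLoop signs 0

-- ===== PORT B =====
-- [i for i, x in enumerate(signs) if x == '+'] : indexed recursion, i is the enumerate counter
def plusPosAux (l : List String) (i : Nat) : List Nat :=
  match l with
  | [] => []
  | x :: xs => if x == "+" then i :: plusPosAux xs (i + 1) else plusPosAux xs (i + 1)

-- any(i <= 2*j - 2 for j, i in enumerate(plus_positions)) : j is the enumerate counter
def anyPlusAux (ps : List Nat) (j : Nat) : Bool :=
  match ps with
  | [] => false
  | i :: rest => decide ((i : Int) ≤ 2 * (j : Int) - 2) || anyPlusAux rest (j + 1)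

def f_alt (signs : List String) : Bool := anyPlusAux (plusPosAux signs 0) 0

-- ===== PRECONDITION & SPEC =====
def Spec_f (signs : List String) (out : Bool) : Prop := out = f_alt signs
instance (signs : List String) (out : Bool) : Decidable (Spec_f signs out) := by unfold Spec_f; infer_instance

-- ===== CLAIM (what is proved, stated in full; the proofs are below) =====
def Claim_equal_f : Prop := ∀ (signs : List String), Dom_f signs → Spec_f signs (f signs)

-- ===== LEMMAS AND PROOFS =====
-- Invariant: after consuming i signs, j of them '+', the balance is 2*j - i;
-- while the loop is still running that balance is < 3.
theorem fLoop_eq_aux (l : List String) :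
    ∀ (i j : Nat), 2 * (j : Int) - i < 3 →
      fLoop l (2 * (j : Int) - i) = anyPlusAux (plusPosAux l i) j := by
  induction l with
  | nil => intro i j _; simp [fLoop, plusPosAux, anyPlusAux]
  | cons x xs ih =>
    intro i j hlt
    by_cases hx : x == "+"
    · have hbal : (2 * (j : Int) - i) + 1 = 2 * ((j : Nat) + 1 : Nat) - ((i : Nat) + 1 : Nat) := by
        push_cast; ring
      by_cases hge : 2 * (j : Int) - i + 1 ≥ 3
      · have hc : ((i : Int) ≤ 2 * (j : Int) - 2) := by omega
        simp [fLoop, plusPosAux, anyPlusAux, hx, hge, hc]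
      · have hc : ¬ ((i : Int) ≤ 2 * (j : Int) - 2) := by omega
        have := ih (i + 1) (j + 1) (by push_cast; omega)
        simp [fLoop, plusPosAux, anyPlusAux, hx, hge, hc]
        rw [hbal]; exact this
    · have hge : ¬ (2 * (j : Int) - i - 1 ≥ 3) := by omega
      have hbal : (2 * (j : Int) - i) - 1 = 2 * (j : Int) - ((i : Nat) + 1 : Nat) := by
        push_cast; ring
      have := ih (i + 1) j (by push_cast; omega)
      simp [fLoop, plusPosAux, hx, hge]
      rw [hbal]; exact this

-- ===== VERDICT (by name: the statement is the Claim_ definition above) =====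
theorem f_spec : Claim_equal_f := by
  intro signs _
  unfold Spec_f f f_alt
  have := fLoop_eq_aux signs 0 0 (by norm_num)
  simpa using this
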